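-- pv_equiv track=rewrite | github.com/chlendyd7/Algorithm | day/250721/파리 퇴치.py | solution
-- ===== SOURCE A (Python) =====
-- def solution(n, m, board):
--     prefix = [[0] * (n+1) for _ in range(n+1)]
--
--     for i in range(1, n+1):
--         for j in range(1, n+1):
--             prefix[i][j] = (
--                 board[i-1][j-1]
--                 + prefix[i-1][j]
--                 + prefix[i][j-1]
--                 - prefix[i-1][j-1]
--             )
--
--     max_result = 0
--     for i in range(m, n+1):
--         for j in range(m, n+1):
--             result = (
--                 prefix[i][j]
--                 - prefix[i-m][j]
--                 - prefix[i][j-m]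
--                 + prefix[i-m][j-m]
--                 )
--             max_result = max(max_result, result)
--
--     return max_result
-- ===== SOURCE B (Python) =====
-- def solution(n, m, board):
--     best = 0
--     for i in range(m, n + 1):
--         for j in range(m, n + 1):
--             s = 0
--             for r in range(i - m, i):
--                 for c in range(j - m, j):
--                     s += board[r][c]
--             best = max(best, s)
--     return best
-- ===== Notes on version B (the rewrite author's own statement) =====
-- stated objective: simpler
-- what changed: B drops A's (n+1)x(n+1) prefix-sum table and computes each m*m window sum directly by iterating the window's rows and columns.
import Mathlib
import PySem

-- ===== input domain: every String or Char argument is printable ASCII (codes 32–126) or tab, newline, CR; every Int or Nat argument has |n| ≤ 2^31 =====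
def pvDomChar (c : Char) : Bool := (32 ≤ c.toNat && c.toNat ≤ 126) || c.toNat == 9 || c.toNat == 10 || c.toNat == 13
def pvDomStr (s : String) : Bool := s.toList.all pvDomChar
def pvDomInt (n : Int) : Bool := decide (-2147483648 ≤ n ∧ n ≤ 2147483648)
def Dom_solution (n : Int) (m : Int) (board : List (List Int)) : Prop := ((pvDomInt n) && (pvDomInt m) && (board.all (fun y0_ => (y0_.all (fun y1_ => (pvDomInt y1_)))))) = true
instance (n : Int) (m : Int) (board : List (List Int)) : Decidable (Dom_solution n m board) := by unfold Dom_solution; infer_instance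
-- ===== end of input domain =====

-- B replaces A's (n+1)x(n+1) prefix-sum table by a direct sum over each m*m window (simpler, not faster).
-- Equivalence of RETURN values only; neither program mutates its arguments observably.

-- ===== PORT A =====
-- xs[r][c] for both ports; exact where the Python index is in range (guaranteed under Pre_solution);
-- the IndexError case (none) is totalized to 0, but Pre_solution excludes it.
def idx2 (xss : List (List Int)) (r c : Int) : Int :=
  ((PySem.List.pyGet? ((PySem.List.pyGet? xss r).getD []) c)).getD 0

-- the assignment 'prefix[i][j] = board[i-1][j-1] + prefix[i-1][j] + prefix[i][j-1] - prefix[i-1][j-1]'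
def stepA (board : List (List Int)) (p : List (List Int)) (i j : Int) : List (List Int) :=
  p.set i.toNat ((p.getD i.toNat []).set j.toNat
    (idx2 board (i-1) (j-1) + idx2 p (i-1) j + idx2 p i (j-1) - idx2 p (i-1) (j-1)))

def solution (n : Int) (m : Int) (board : List (List Int)) : Int :=
  let pref0 : List (List Int) := List.replicate (n+1).toNat (List.replicate (n+1).toNat 0)
  let pref := (PySem.List.pyRange 1 (n+1) 1).foldl (fun p i =>
      (PySem.List.pyRange 1 (n+1) 1).foldl (fun p j => stepA board p i j) p) pref0
  (PySem.List.pyRange m (n+1) 1).foldl (fun mx i =>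
    (PySem.List.pyRange m (n+1) 1).foldl (fun mx j =>
      max mx (idx2 pref i j - idx2 pref (i-m) j - idx2 pref i (j-m) + idx2 pref (i-m) (j-m))) mx) 0

-- ===== PORT B =====
def solution_alt (n : Int) (m : Int) (board : List (List Int)) : Int :=
  (PySem.List.pyRange m (n+1) 1).foldl (fun best i =>
    (PySem.List.pyRange m (n+1) 1).foldl (fun best j =>
      max best ((PySem.List.pyRange (i-m) i 1).foldl (fun s r =>
        (PySem.List.pyRange (j-m) j 1).foldl (fun s c => s + idx2 board r c) s) 0)) best) 0

-- ===== PRECONDITION & SPEC =====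
-- Pre_ excludes exactly the inputs where the Python A raises IndexError: a negative m whose window
-- loops are nonempty (negative prefix indices then overrun the table), and, when n ≥ 1, a board with
-- fewer than n rows or a row among the first n shorter than n.
def Pre_solution (n : Int) (m : Int) (board : List (List Int)) : Prop :=
  (0 ≤ m ∨ n < m) ∧
  (n ≤ 0 ∨ (n.toNat ≤ board.length ∧ ∀ row ∈ board.take n.toNat, n.toNat ≤ row.length))
instance (n : Int) (m : Int) (board : List (List Int)) : Decidable (Pre_solution n m board) := by
  unfold Pre_solution; infer_instance

def pvWitness_solution : Int × Int × List (List Int) := (2, 1, [[1, 2], [3, 4]])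

def Spec_solution (n : Int) (m : Int) (board : List (List Int)) (out : Int) : Prop := out = solution_alt n m board
instance (n : Int) (m : Int) (board : List (List Int)) (out : Int) : Decidable (Spec_solution n m board out) := by unfold Spec_solution; infer_instance

-- ===== CLAIM (what is proved, stated in full; the proofs are below) =====
def Claim_equal_solution : Prop := ∀ (n : Int) (m : Int) (board : List (List Int)), Dom_solution n m board → Pre_solution n m board → Spec_solution n m board (solution n m board)

-- ===== LEMMAS AND PROOFS =====

-- the entry board[r][c] as a function of Nat indices (totalized like idx2)
def fB (board : List (List Int)) (r c : Nat) : Int := idx2 board (r : Int) (c : Int)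

-- row prefix sum: rowS f r j = Σ_{c<j} f r c
def rowS (f : Nat → Nat → Int) (r : Nat) : Nat → Int
  | 0 => 0
  | j+1 => rowS f r j + f r j

-- 2-D prefix sum: pS f i j = Σ_{r<i} Σ_{c<j} f r c
def pS (f : Nat → Nat → Int) : Nat → Nat → Int
  | 0, _ => 0
  | i+1, j => pS f i j + rowS f i j

-- the table [[g i j for j in range N] for i in range N]
def tab (N : Nat) (g : Nat → Nat → Int) : List (List Int) :=
  (List.range N).map (fun i => (List.range N).map (fun j => g i j))

-- table state during A's inner loop: rows < K final, row K done up to column l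
def G (f : Nat → Nat → Int) (K l : Nat) (i j : Nat) : Int :=
  if i < K ∨ (i = K ∧ j ≤ l) then pS f i j else 0

-- table state after A's outer loop has processed rows 1..k
def Out (f : Nat → Nat → Int) (k : Nat) (i j : Nat) : Int :=
  if i ≤ k then pS f i j else 0

lemma tab_congr (N : Nat) (g g' : Nat → Nat → Int)
    (h : ∀ i < N, ∀ j < N, g i j = g' i j) : tab N g = tab N g' := by
  unfold tab
  refine List.map_congr_left (fun i hi => ?_)
  exact List.map_congr_left (fun j hj => h i (List.mem_range.mp hi) j (List.mem_range.mp hj))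

lemma idx2_tab (g : Nat → Nat → Int) (N : Nat) (i j : Int)
    (hi0 : 0 ≤ i) (hi : i < (N : Int)) (hj0 : 0 ≤ j) (hj : j < (N : Int)) :
    idx2 (tab N g) i j = g i.toNat j.toNat := by
  have hik : i.toNat < N := by omega
  have hjk : j.toNat < N := by omega
  simp [idx2, tab, PySem.List.pyGet?_of_nonneg _ hi0, PySem.List.pyGet?_of_nonneg _ hj0, hik, hjk]

lemma set_tab (g : Nat → Nat → Int) (N a b : Nat) (ha : a < N) (_hb : b < N) (v : Int) :
    (tab N g).set a (((tab N g).getD a []).set b v)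
      = tab N (fun i j => if i = a ∧ j = b then v else g i j) := by
  have hget : (tab N g).getD a [] = (List.range N).map (g a) := by
    simp [tab, List.getD, ha]
  rw [hget]
  apply List.ext_getElem
  · simp [tab]
  · intro i h1 h2
    have hiN : i < N := by simpa [tab] using h2
    simp only [tab, List.getElem_set, List.getElem_map, List.getElem_range]
    split_ifs with hia
    · subst hia
      apply List.ext_getElem
      · simp
      · intro j h3 h4
        have hjN : j < N := by simpa using h4
        simp only [List.getElem_set, List.getElem_map, List.getElem_range]
        split_ifs with h1 h2 h3 <;> first | rfl | tauto
    · exact List.map_congr_left (fun j hj => by rw [if_neg (fun hh => hia hh.1.symm)])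

lemma pS_zero (f : Nat → Nat → Int) (i : Nat) : pS f i 0 = 0 := by
  induction i with
  | zero => rfl
  | succ k ih => simp [pS, rowS, ih]

lemma pS_succ_succ (f : Nat → Nat → Int) (i j : Nat) :
    pS f (i+1) (j+1) = f i j + pS f i (j+1) + pS f (i+1) j - pS f i j := by
  simp [pS, rowS]; ring

lemma colDiff (f : Nat → Nat → Int) (r b e : Nat) :
    rowS f r (b+e) - rowS f r b = ((List.range e).map (fun u => f r (b+u))).sum := by
  induction e with
  | zero => simp
  | succ k ih =>
    rw [List.range_succ]
    simp only [List.map_append, List.sum_append, List.map_cons, List.sum_cons, List.map_nil,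
      List.sum_nil, add_zero]
    have : b + (k+1) = (b+k) + 1 := by omega
    rw [this]
    simp only [rowS]
    omega

lemma rect (f : Nat → Nat → Int) (a b d e : Nat) :
    pS f (a+d) (b+e) - pS f a (b+e) - pS f (a+d) b + pS f a b
      = ((List.range d).map (fun t => ((List.range e).map (fun u => f (a+t) (b+u))).sum)).sum := by
  induction d with
  | zero => simp
  | succ k ih =>
    rw [List.range_succ]
    simp only [List.map_append, List.sum_append, List.map_cons, List.sum_cons, List.map_nil,
      List.sum_nil, add_zero]
    have h1 : a + (k+1) = (a+k) + 1 := by omega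
    rw [h1]
    simp only [pS]
    have h2 := colDiff f (a+k) b e
    omega

lemma inner_loop (board : List (List Int)) (N K : Nat) (hK1 : 1 ≤ K) (hK : K ≤ N) :
    ∀ l, l ≤ N →
    (List.range l).foldl (fun p (k : Nat) => stepA board p (K : Int) (1 + (k : Int)))
        (tab (N+1) (G (fB board) K 0))
      = tab (N+1) (G (fB board) K l) := by
  intro l hl
  induction l with
  | zero => rfl
  | succ l ih =>
    rw [List.range_succ, List.foldl_append, ih (by omega)]
    obtain ⟨K', rfl⟩ : ∃ K', K = K' + 1 := ⟨K - 1, by omega⟩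
    show stepA board (tab (N+1) (G (fB board) (K'+1) l)) (((K'+1 : Nat)) : Int) (1 + ((l : Nat) : Int))
        = tab (N+1) (G (fB board) (K'+1) (l+1))
    have hKi : ((K'+1 : Nat) : Int) - 1 = ((K' : Nat) : Int) := by push_cast; ring
    have hji : (1 : Int) + (l : Int) - 1 = ((l : Nat) : Int) := by ring
    have hj1 : (1 : Int) + (l : Int) = ((l+1 : Nat) : Int) := by push_cast; ring
    unfold stepA
    rw [hKi, hji, hj1]
    rw [idx2_tab _ _ _ _ (by positivity) (by exact_mod_cast by omega) (by positivity) (by exact_mod_cast by omega)]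
    rw [idx2_tab _ _ _ _ (by positivity) (by exact_mod_cast by omega) (by positivity) (by exact_mod_cast by omega)]
    rw [idx2_tab _ _ _ _ (by positivity) (by exact_mod_cast by omega) (by positivity) (by exact_mod_cast by omega)]
    simp only [Int.toNat_natCast]
    rw [set_tab _ _ _ _ (by omega) (by omega)]
    apply tab_congr
    intro i hi j hj
    have hG1 : G (fB board) (K'+1) l K' (l+1) = pS (fB board) K' (l+1) := by
      simp [G]
    have hG2 : G (fB board) (K'+1) l (K'+1) l = pS (fB board) (K'+1) l := by
      simp [G]
    have hG3 : G (fB board) (K'+1) l K' l = pS (fB board) K' l := by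
      simp [G]
    rw [hG1, hG2, hG3]
    by_cases hc : i = K' + 1 ∧ j = l + 1
    · obtain ⟨rfl, rfl⟩ := hc
      rw [if_pos (by simp)]
      unfold G
      rw [if_pos (by omega), pS_succ_succ]
      rfl
    · rw [if_neg hc]
      unfold G
      by_cases h1 : i < K' + 1 ∨ (i = K' + 1 ∧ j ≤ l)
      · rw [if_pos h1, if_pos (by omega)]
      · rw [if_neg h1, if_neg (by omega)]

lemma outer_loop (board : List (List Int)) (N : Nat) :
    ∀ k, k ≤ N →
    (List.range k).foldl (fun p (t : Nat) =>
        (List.range N).foldl (fun p (k2 : Nat) => stepA board p (1 + (t : Int)) (1 + (k2 : Int))) p)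
        (tab (N+1) (Out (fB board) 0))
      = tab (N+1) (Out (fB board) k) := by
  intro k hk
  induction k with
  | zero => rfl
  | succ k ih =>
    rw [List.range_succ, List.foldl_append, ih (by omega)]
    show (List.range N).foldl (fun p (k2 : Nat) => stepA board p (1 + (k : Int)) (1 + (k2 : Int)))
        (tab (N+1) (Out (fB board) k)) = tab (N+1) (Out (fB board) (k+1))
    have hstart : tab (N+1) (Out (fB board) k) = tab (N+1) (G (fB board) (k+1) 0) := by
      apply tab_congr; intro i hi j hj
      unfold Out G
      by_cases h1 : i ≤ k
      · rw [if_pos h1, if_pos (by omega)]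
      · rw [if_neg h1]
        by_cases h2 : i < k + 1 ∨ (i = k + 1 ∧ j ≤ 0)
        · rw [if_pos h2]
          have : i = k + 1 ∧ j = 0 := by omega
          rw [this.2, pS_zero]
        · rw [if_neg h2]
    have hcast : (1 : Int) + (k : Int) = ((k+1 : Nat) : Int) := by push_cast; ring
    rw [hstart]
    calc (List.range N).foldl (fun p (k2 : Nat) => stepA board p (1 + (k : Int)) (1 + (k2 : Int)))
          (tab (N+1) (G (fB board) (k+1) 0))
        = (List.range N).foldl (fun p (k2 : Nat) => stepA board p ((k+1 : Nat) : Int) (1 + (k2 : Int)))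
          (tab (N+1) (G (fB board) (k+1) 0)) := by rw [hcast]
      _ = tab (N+1) (G (fB board) (k+1) N) := inner_loop board N (k+1) (by omega) (by omega) N (le_refl N)
      _ = tab (N+1) (Out (fB board) (k+1)) := by
          apply tab_congr; intro i hi j hj
          unfold G Out
          by_cases h1 : i ≤ k + 1
          · rw [if_pos (by omega), if_pos h1]
          · rw [if_neg (by omega), if_neg h1]

-- the built prefix table equals the mathematical 2-D prefix sums
lemma build_eq (board : List (List Int)) (n : Int) (hn : 0 ≤ n) :
    (PySem.List.pyRange 1 (n+1) 1).foldl (fun p i =>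
        (PySem.List.pyRange 1 (n+1) 1).foldl (fun p j => stepA board p i j) p)
      (List.replicate (n+1).toNat (List.replicate (n+1).toNat 0))
    = tab (n.toNat + 1) (Out (fB board) n.toNat) := by
  have hsz : (n+1).toNat = n.toNat + 1 := by omega
  have hrepl : List.replicate (n.toNat + 1) (List.replicate (n.toNat + 1) (0:Int))
      = tab (n.toNat + 1) (Out (fB board) 0) := by
    apply List.ext_getElem
    · simp [tab]
    · intro i h1 h2
      have hiN : i < n.toNat + 1 := by simpa using h1
      simp only [List.getElem_replicate, tab, List.getElem_map, List.getElem_range]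
      apply List.ext_getElem
      · simp
      · intro j h3 h4
        simp only [List.getElem_replicate, List.getElem_map, List.getElem_range]
        unfold Out
        split_ifs with h
        · have : i = 0 := by omega
          rw [this]; rfl
        · rfl
  have hrange : PySem.List.pyRange 1 (n+1) 1 = (List.range n.toNat).map (fun (k : Nat) => 1 + (k : Int)) := by
    rw [PySem.List.pyRange_one, show (n + 1 - 1).toNat = n.toNat from by omega]
  rw [hsz, hrepl, hrange]
  rw [List.foldl_map]
  have hinner : ∀ (t : Nat) (p : List (List Int)),
      ((List.range n.toNat).map (fun (k : Nat) => 1 + (k : Int))).foldl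
        (fun p j => stepA board p (1 + (t : Int)) j) p
      = (List.range n.toNat).foldl (fun p (k2 : Nat) => stepA board p (1 + (t : Int)) (1 + (k2 : Int))) p := by
    intro t p; rw [List.foldl_map]
  calc (List.range n.toNat).foldl (fun p (t : Nat) =>
          ((List.range n.toNat).map (fun (k : Nat) => 1 + (k : Int))).foldl
            (fun p j => stepA board p (1 + (t : Int)) j) p)
          (tab (n.toNat + 1) (Out (fB board) 0))
      = (List.range n.toNat).foldl (fun p (t : Nat) =>
          (List.range n.toNat).foldl (fun p (k2 : Nat) => stepA board p (1 + (t : Int)) (1 + (k2 : Int))) p)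
          (tab (n.toNat + 1) (Out (fB board) 0)) := by
        apply PySem.List.foldl_congr_mem
        intro acc x _
        exact hinner x acc
    _ = tab (n.toNat + 1) (Out (fB board) n.toNat) := outer_loop board n.toNat n.toNat (le_refl _)

-- B's window sum as a double list sum
lemma winB_eq (board : List (List Int)) (m i j : Int) (hm : 0 ≤ m) (hi : m ≤ i) (hj : m ≤ j) :
    (PySem.List.pyRange (i-m) i 1).foldl (fun s r =>
        (PySem.List.pyRange (j-m) j 1).foldl (fun s c => s + idx2 board r c) s) 0
    = ((List.range m.toNat).map (fun t =>
        ((List.range m.toNat).map (fun u =>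
          fB board ((i-m).toNat + t) ((j-m).toNat + u))).sum)).sum := by
  have hr : PySem.List.pyRange (i-m) i 1 = (List.range m.toNat).map (fun (k : Nat) => (i-m) + (k : Int)) := by
    rw [PySem.List.pyRange_one, show (i - (i-m)).toNat = m.toNat from by omega]
  have hc : PySem.List.pyRange (j-m) j 1 = (List.range m.toNat).map (fun (k : Nat) => (j-m) + (k : Int)) := by
    rw [PySem.List.pyRange_one, show (j - (j-m)).toNat = m.toNat from by omega]
  rw [hr, List.foldl_map]
  have hstep : ∀ (s : Int) (t : Nat), t ∈ List.range m.toNat →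
      (PySem.List.pyRange (j-m) j 1).foldl (fun s c => s + idx2 board ((i-m) + (t:Int)) c) s
      = s + ((List.range m.toNat).map (fun u => fB board ((i-m).toNat + t) ((j-m).toNat + u))).sum := by
    intro s t _
    rw [hc, List.foldl_map, PySem.List.foldl_add]
    congr 1
    refine congrArg List.sum ?_
    apply List.map_congr_left
    intro u _
    unfold fB
    congr 1 <;> omega
  calc (List.range m.toNat).foldl
        (fun s (t : Nat) => (PySem.List.pyRange (j-m) j 1).foldl (fun s c => s + idx2 board ((i-m) + (t:Int)) c) s) 0
      = (List.range m.toNat).foldl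
        (fun s (t : Nat) => s + ((List.range m.toNat).map (fun u => fB board ((i-m).toNat + t) ((j-m).toNat + u))).sum) 0 := by
        apply PySem.List.foldl_congr_mem
        intro acc x hx
        exact hstep acc x hx
    _ = _ := by rw [PySem.List.foldl_add]; simp

-- per-window equality of A's prefix-difference and B's direct sum
lemma window_eq (board : List (List Int)) (n m i j : Int) (hm : 0 ≤ m)
    (hi1 : m ≤ i) (hi2 : i < n + 1) (hj1 : m ≤ j) (hj2 : j < n + 1) :
    idx2 (tab (n.toNat + 1) (Out (fB board) n.toNat)) i j
      - idx2 (tab (n.toNat + 1) (Out (fB board) n.toNat)) (i-m) j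
      - idx2 (tab (n.toNat + 1) (Out (fB board) n.toNat)) i (j-m)
      + idx2 (tab (n.toNat + 1) (Out (fB board) n.toNat)) (i-m) (j-m)
    = (PySem.List.pyRange (i-m) i 1).foldl (fun s r =>
        (PySem.List.pyRange (j-m) j 1).foldl (fun s c => s + idx2 board r c) s) 0 := by
  have hn : 0 ≤ n := by omega
  have hN : ((n.toNat + 1 : Nat) : Int) = n + 1 := by omega
  have e1 := idx2_tab (Out (fB board) n.toNat) (n.toNat + 1) i j (by omega) (by omega) (by omega) (by omega)
  have e2 := idx2_tab (Out (fB board) n.toNat) (n.toNat + 1) (i-m) j (by omega) (by omega) (by omega) (by omega)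
  have e3 := idx2_tab (Out (fB board) n.toNat) (n.toNat + 1) i (j-m) (by omega) (by omega) (by omega) (by omega)
  have e4 := idx2_tab (Out (fB board) n.toNat) (n.toNat + 1) (i-m) (j-m) (by omega) (by omega) (by omega) (by omega)
  rw [e1, e2, e3, e4, winB_eq board m i j hm hi1 hj1]
  have hOut : ∀ a b : Nat, a ≤ n.toNat → Out (fB board) n.toNat a b = pS (fB board) a b := by
    intro a b ha; unfold Out; rw [if_pos ha]
  rw [hOut _ _ (by omega), hOut _ _ (by omega), hOut _ _ (by omega), hOut _ _ (by omega)]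
  have hIa : i.toNat = (i-m).toNat + m.toNat := by omega
  have hJa : j.toNat = (j-m).toNat + m.toNat := by omega
  rw [hIa, hJa]
  exact rect (fB board) (i-m).toNat (j-m).toNat m.toNat m.toNat

-- ===== VERDICT (by name: the statement is the Claim_ definition above) =====
theorem solution_spec : Claim_equal_solution := by
  intro n m board _ hpre
  simp only [Spec_solution, solution, solution_alt]
  by_cases hnm : n < m
  · have : PySem.List.pyRange m (n+1) 1 = [] := PySem.List.pyRange_one_eq_nil (by omega)
    simp [this]
  · have hm : 0 ≤ m := by rcases hpre.1 with h | h; exact h; omega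
    have hn : 0 ≤ n := by omega
    rw [build_eq board n hn]
    apply PySem.List.foldl_congr_mem
    intro acc i hi
    apply PySem.List.foldl_congr_mem
    intro acc2 j hj
    rw [PySem.List.mem_pyRange_one] at hi hj
    rw [window_eq board n m i j hm hi.1 hi.2 hj.1 hj.2]
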